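-- pv_equiv track=rewrite | github.com/OffGrid0xDAO/OffGrid-Scalp-Bot | archive/old_implementation/backup_before_deep_cleanup_20251020_154101/archive/scratches/training_history.py | _get_worst_direction
-- ===== SOURCE A (Python) =====
-- from typing import Dict, List
--
-- def _get_worst_direction(losers: List) -> str:
--     """Determine which direction has more losers"""
--     if not losers:
--         return "NONE"
--
--     long_losses = len([l for l in losers if l['direction'] == 'LONG'])
--     short_losses = len([l for l in losers if l['direction'] == 'SHORT'])
--
--     if long_losses > short_losses:
--         return f"LONG ({long_losses} losses)"
--     elif short_losses > long_losses:
--         return f"SHORT ({short_losses} losses)"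
--     else:
--         return "EQUAL"
-- ===== SOURCE B (Python) =====
-- def _get_worst_direction(losers):
--     """Determine which direction has more losers.
--
--     Signed-balance algorithm: one pass keeps balance (+1 per LONG, -1 per SHORT)
--     and the number of classified elements; the SIGN of the balance picks the
--     majority direction and its count is recovered arithmetically as
--     (classified + |balance|-part) // 2, so no two counters are ever compared.
--     """
--     if not losers:
--         return "NONE"
--     balance = 0
--     classified = 0
--     for l in losers:
--         d = l['direction']
--         if d == 'LONG':
--             balance += 1
--             classified += 1
--         elif d == 'SHORT':
--             balance -= 1
--             classified += 1
--     if balance > 0: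
--         return f"LONG ({(classified + balance) // 2} losses)"
--     if balance < 0:
--         return f"SHORT ({(classified - balance) // 2} losses)"
--     return "EQUAL"
-- ===== Notes on version B (the rewrite author's own statement) =====
-- stated objective: alternative
-- what changed: B replaces A's two counters compared against each other by a signed-balance scheme: one pass accumulates balance (+1 LONG, -1 SHORT) and a classified total, the sign of the balance picks the majority and the winning count is recovered arithmetically as (classified ± balance) // 2.
import Mathlib
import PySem

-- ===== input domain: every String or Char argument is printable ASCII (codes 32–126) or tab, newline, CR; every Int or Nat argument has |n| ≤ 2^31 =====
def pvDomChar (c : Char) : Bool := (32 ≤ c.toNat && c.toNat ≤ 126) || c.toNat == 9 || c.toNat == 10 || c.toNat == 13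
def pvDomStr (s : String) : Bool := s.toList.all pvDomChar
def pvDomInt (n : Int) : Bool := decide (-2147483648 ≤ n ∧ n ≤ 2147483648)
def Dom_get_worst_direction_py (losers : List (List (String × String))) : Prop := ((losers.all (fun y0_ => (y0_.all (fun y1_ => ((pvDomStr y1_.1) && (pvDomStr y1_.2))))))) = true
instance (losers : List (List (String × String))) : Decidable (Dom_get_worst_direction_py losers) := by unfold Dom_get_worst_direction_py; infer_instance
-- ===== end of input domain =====

-- B replaces A's two compared counters by one signed balance (+1 LONG, -1 SHORT) plus a
-- classified total, deciding by the sign and recovering the count by // 2; same output.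

-- ===== PORT A =====
-- l['direction']: first-match association-list lookup; Pre_ guarantees the key exists, so the
-- default "" is never produced on admitted inputs (Python raises KeyError exactly there).
def pvDirOf (l : List (String × String)) : String :=
  PySem.Dict.getD (PySem.Dict.mk l) "direction" ""

def get_worst_direction_py (losers : List (List (String × String))) : String :=
  if losers = [] then "NONE"
  else
    let long_losses : Int := ((losers.filter (fun l => pvDirOf l == "LONG")).length : Int)
    let short_losses : Int := ((losers.filter (fun l => pvDirOf l == "SHORT")).length : Int)
    if long_losses > short_losses then "LONG (" ++ PySem.Int.toStr long_losses ++ " losses)"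
    else if short_losses > long_losses then "SHORT (" ++ PySem.Int.toStr short_losses ++ " losses)"
    else "EQUAL"

-- ===== PORT B =====
-- state = (balance, classified)
def pvStep (acc : Int × Int) (l : List (String × String)) : Int × Int :=
  let d := pvDirOf l
  if d == "LONG" then (acc.1 + 1, acc.2 + 1)
  else if d == "SHORT" then (acc.1 - 1, acc.2 + 1)
  else acc

def get_worst_direction_py_alt (losers : List (List (String × String))) : String :=
  if losers = [] then "NONE"
  else
    let st := losers.foldl pvStep (0, 0)
    if st.1 > 0 then "LONG (" ++ PySem.Int.toStr (PySem.Int.floordiv (st.2 + st.1) 2) ++ " losses)"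
    else if st.1 < 0 then "SHORT (" ++ PySem.Int.toStr (PySem.Int.floordiv (st.2 - st.1) 2) ++ " losses)"
    else "EQUAL"

-- ===== PRECONDITION & SPEC =====
-- Pre_ excludes exactly the inputs where some element lacks the key 'direction': there the
-- Python A (and B alike) raises KeyError instead of returning a string.
def Pre_get_worst_direction_py (losers : List (List (String × String))) : Prop :=
  ∀ l ∈ losers, (PySem.Dict.mk l).contains "direction" = true
instance (losers : List (List (String × String))) : Decidable (Pre_get_worst_direction_py losers) := by unfold Pre_get_worst_direction_py; infer_instance
def pvWitness_get_worst_direction_py : (List (List (String × String))) :=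
  [[("direction", "LONG")], [("direction", "SHORT")], [("direction", "LONG")]]

def Spec_get_worst_direction_py (losers : List (List (String × String))) (out : String) : Prop := out = get_worst_direction_py_alt losers
instance (losers : List (List (String × String))) (out : String) : Decidable (Spec_get_worst_direction_py losers out) := by unfold Spec_get_worst_direction_py; infer_instance

-- ===== CLAIM (what is proved, stated in full; the proofs are below) =====
def Claim_equal_get_worst_direction_py : Prop := ∀ (losers : List (List (String × String))), Dom_get_worst_direction_py losers → Pre_get_worst_direction_py losers → Spec_get_worst_direction_py losers (get_worst_direction_py losers)

-- ===== LEMMAS AND PROOFS =====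
-- Fold invariant: after processing xs from (a, b), balance grew by L - S and
-- classified by L + S, where L/S are the filter lengths A computes.
lemma pvFold_eq (xs : List (List (String × String))) : ∀ a b : Int,
    xs.foldl pvStep (a, b)
      = (a + ((xs.filter (fun l => pvDirOf l == "LONG")).length : Int)
           - ((xs.filter (fun l => pvDirOf l == "SHORT")).length : Int),
         b + ((xs.filter (fun l => pvDirOf l == "LONG")).length : Int)
           + ((xs.filter (fun l => pvDirOf l == "SHORT")).length : Int)) := by
  induction xs with
  | nil => simp
  | cons l t ih =>
    intro a b
    by_cases hL : pvDirOf l = "LONG"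
    · simp [List.foldl, pvStep, hL, ih]; constructor <;> ring
    · by_cases hS : pvDirOf l = "SHORT"
      · simp [List.foldl, pvStep, hL, hS, ih]; constructor <;> ring
      · simp [List.foldl, pvStep, hL, hS, ih]

lemma pvHalf (n : Int) : PySem.Int.floordiv (2 * n) 2 = n := by
  rw [PySem.Int.floordiv_eq_ediv_of_pos (by omega)]
  omega

-- ===== VERDICT (by name: the statement is the Claim_ definition above) =====
theorem get_worst_direction_py_spec : Claim_equal_get_worst_direction_py := by
  intro losers _ _
  unfold Spec_get_worst_direction_py get_worst_direction_py get_worst_direction_py_alt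
  by_cases h : losers = []
  · simp [h]
  · simp only [h, if_false]
    rw [show losers.foldl pvStep (0, 0) = losers.foldl pvStep ((0 : Int), (0 : Int)) from rfl,
        pvFold_eq]
    set L : Int := ((losers.filter (fun l => pvDirOf l == "LONG")).length : Int) with hLdef
    set S : Int := ((losers.filter (fun l => pvDirOf l == "SHORT")).length : Int) with hSdef
    have hL0 : 0 ≤ L := by positivity
    have hS0 : 0 ≤ S := by positivity
    have h1 : (0 + L + S + (0 + L - S)) = 2 * L := by ring
    have h2 : (0 + L + S - (0 + L - S)) = 2 * S := by ring
    simp only [h1, h2, pvHalf]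
    by_cases hgt : L > S
    · simp [hgt, show 0 + L - S > 0 by omega]
    · by_cases hlt : S > L
      · simp [hlt, show ¬ (L > S) from hgt, show ¬ (0 + L - S > 0) by omega,
              show 0 + L - S < 0 by omega]
      · simp [hgt, hlt, show ¬(0 + L - S > 0) by omega]
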